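-- pv_equiv track=rewrite | github.com/rennf93/fastapi-guard | .github/scripts/bump_version.py | is_latest
-- ===== SOURCE A (Python) =====
-- def parse_semver(version: str) -> tuple[int, ...]:
--     """Parse a semver string into a comparable tuple."""
--     return tuple(int(part) for part in version.split("."))
--
-- def is_latest(new_version: str, existing_versions: list[str]) -> bool:
--     """Return True if new_version is >= all existing versions."""
--     new_parsed = parse_semver(new_version)
--     for v in existing_versions:
--         try:
--             if parse_semver(v) > new_parsed:
--                 return False
--         except ValueError:
--             continue
--     return True
-- ===== SOURCE B (Python) =====
-- def _parse(version):
--     return tuple(int(part) for part in version.split("."))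
--
-- def is_latest(new_version, existing_versions):
--     new_parsed = _parse(new_version)
--     parsed = []
--     for v in existing_versions:
--         try:
--             parsed.append(_parse(v))
--         except ValueError:
--             pass
--     return not parsed or new_parsed >= max(parsed)
-- ===== Notes on version B (the rewrite author's own statement) =====
-- stated objective: alternative
-- what changed: A short-circuits a scan asking whether any existing version parses greater; B first filters to the list of parseable versions, then returns True if that list is empty and otherwise compares new_parsed >= max(parsed).
import Mathlib
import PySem

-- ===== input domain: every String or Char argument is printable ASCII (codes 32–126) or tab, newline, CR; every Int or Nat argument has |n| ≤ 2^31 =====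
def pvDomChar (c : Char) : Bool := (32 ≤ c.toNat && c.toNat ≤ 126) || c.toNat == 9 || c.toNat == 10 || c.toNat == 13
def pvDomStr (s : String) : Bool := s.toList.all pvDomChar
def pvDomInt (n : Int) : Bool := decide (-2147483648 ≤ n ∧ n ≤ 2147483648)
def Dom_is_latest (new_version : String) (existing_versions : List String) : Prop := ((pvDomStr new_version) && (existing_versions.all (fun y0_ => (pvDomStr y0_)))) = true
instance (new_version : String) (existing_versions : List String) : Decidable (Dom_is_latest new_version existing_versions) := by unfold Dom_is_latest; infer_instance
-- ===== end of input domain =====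

-- B replaces A's short-circuiting "any existing parses greater" scan by a filter-then-reduce
-- decomposition: collect the parseable versions, then compare new_parsed >= max of them.

-- parse_semver: int() each '.'-separated part; none = ValueError (shared helper of both ports)
def parseSemver? (version : String) : Option (List Int) :=
  -- sep "." is a non-empty literal, so split? is always some
  (((PySem.Str.split? version ".").getD []).mapM PySem.Int.ofStr?)

-- Python tuple '>' on int tuples, lexicographic (a longer tuple beats its proper prefix)
def lexGt : List Int → List Int → Bool
  | [], _ => false
  | _ :: _, [] => true
  | x :: xs, y :: ys => if x > y then true else if x < y then false else lexGt xs ys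

-- ===== PORT A =====
-- A's for-loop: skip unparseable versions, return False on the first one parsing greater
def loopA (newParsed : List Int) : List String → Bool
  | [] => true
  | v :: rest =>
    match parseSemver? v with
    | some t => if lexGt t newParsed then false else loopA newParsed rest
    | none => loopA newParsed rest

def is_latest (new_version : String) (existing_versions : List String) : Bool :=
  match parseSemver? new_version with
  | none => true   -- unreachable: Python raises ValueError here; excluded by Pre_is_latest
  | some newParsed => loopA newParsed existing_versions

-- ===== PORT B =====
-- Python tuple '>=' on int tuples, lexicographic
def lexGe : List Int → List Int → Bool
  | [], [] => true
  | [], _ :: _ => false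
  | _ :: _, [] => true
  | x :: xs, y :: ys => if x > y then true else if x < y then false else lexGe xs ys

def is_latest_alt (new_version : String) (existing_versions : List String) : Bool :=
  match parseSemver? new_version with
  | none => true   -- unreachable: Python raises ValueError here; excluded by Pre_is_latest
  | some newParsed =>
    let parsed := existing_versions.filterMap parseSemver?
    match parsed with
    | [] => true   -- 'not parsed'
    | h :: t => lexGe newParsed (t.foldl (fun m x => if lexGt x m then x else m) h)  -- max(parsed)

-- ===== PRECONDITION & SPEC =====
-- Pre_ excludes exactly the inputs where A raises ValueError: new_version has a part int() rejects
def Pre_is_latest (new_version : String) (existing_versions : List String) : Prop :=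
  (((PySem.Str.split? new_version ".").getD []).all (fun p => (PySem.Int.ofStr? p).isSome)) = true
instance (new_version : String) (existing_versions : List String) : Decidable (Pre_is_latest new_version existing_versions) := by unfold Pre_is_latest; infer_instance
def pvWitness_is_latest : String × List String := ("1.2.0", ["0.9", "beta", "1.2"])

def Spec_is_latest (new_version : String) (existing_versions : List String) (out : Bool) : Prop := out = is_latest_alt new_version existing_versions
instance (new_version : String) (existing_versions : List String) (out : Bool) : Decidable (Spec_is_latest new_version existing_versions out) := by unfold Spec_is_latest; infer_instance

-- ===== CLAIM (what is proved, stated in full; the proofs are below) =====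
def Claim_equal_is_latest : Prop := ∀ (new_version : String) (existing_versions : List String), Dom_is_latest new_version existing_versions → Pre_is_latest new_version existing_versions → Spec_is_latest new_version existing_versions (is_latest new_version existing_versions)

-- ===== LEMMAS AND PROOFS =====

theorem lexGe_eq_not_lexGt : ∀ (a b : List Int), lexGe a b = !lexGt b a := by
  intro a
  induction a with
  | nil => intro b; cases b <;> simp [lexGe, lexGt]
  | cons x xs ih =>
    intro b
    cases b with
    | nil => simp [lexGe, lexGt]
    | cons y ys =>
      simp only [lexGe, lexGt]
      rcases lt_trichotomy x y with h | h | h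
      · simp [h, not_lt.mpr (le_of_lt h)]
      · simp [h, ih]
      · simp [h, not_lt.mpr (le_of_lt h)]

theorem lexGt_trans : ∀ (a b c : List Int), lexGt a b = true → lexGt b c = true → lexGt a c = true := by
  intro a
  induction a with
  | nil => intro b c h; simp [lexGt] at h
  | cons x xs ih =>
    intro b c hab hbc
    cases b with
    | nil => simp [lexGt] at hbc
    | cons y ys =>
      cases c with
      | nil => simp [lexGt]
      | cons z zs =>
        simp only [lexGt] at hab hbc ⊢
        split_ifs at hab hbc ⊢ with h1 h2 h3 h4 h5 h6 <;>
          first | rfl | omega | exact ih ys zs hab hbc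

theorem lexGt_of_not_gt : ∀ (a b c : List Int), lexGt a b = false → lexGt a c = true → lexGt b c = true := by
  intro a
  induction a with
  | nil => intro b c _ h; simp [lexGt] at h
  | cons x xs ih =>
    intro b c hab hac
    cases c with
    | nil =>
      cases b with
      | nil => simp [lexGt] at hab
      | cons y ys => simp [lexGt]
    | cons z zs =>
      cases b with
      | nil => simp [lexGt] at hab
      | cons y ys =>
        simp only [lexGt] at hab hac ⊢
        split_ifs at hab hac ⊢ with h1 h2 h3 h4 h5 h6 <;>
          first | rfl | omega | exact ih ys zs hab hac

theorem foldl_max_gt : ∀ (t : List (List Int)) (h new : List Int),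
    lexGt (t.foldl (fun m x => if lexGt x m then x else m) h) new
      = (lexGt h new || t.any (fun x => lexGt x new)) := by
  intro t
  induction t with
  | nil => intro h new; simp
  | cons x t' ih =>
    intro h new
    simp only [List.foldl_cons, List.any_cons, ih]
    by_cases hx : lexGt x h = true
    · simp only [hx, if_true]
      cases hh : lexGt h new with
      | false => simp
      | true => simp [lexGt_trans x h new hx hh]
    · simp only [Bool.not_eq_true] at hx
      simp only [hx, Bool.false_eq_true, if_false]
      cases hxn : lexGt x new with
      | false => simp
      | true => simp [lexGt_of_not_gt x h new hx hxn]

theorem loopA_eq_any : ∀ (vs : List String) (newParsed : List Int),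
    loopA newParsed vs = !((vs.filterMap parseSemver?).any (fun t => lexGt t newParsed)) := by
  intro vs
  induction vs with
  | nil => intro np; simp [loopA]
  | cons v rest ih =>
    intro np
    simp only [loopA, List.filterMap_cons]
    cases hp : parseSemver? v with
    | none => simp [ih]
    | some t =>
      cases ht : lexGt t np with
      | true => simp [ht]
      | false => simp [ht, ih]

theorem mapM_isSome_of_all {α β : Type} (f : α → Option β) :
    ∀ (l : List α), (l.all (fun x => (f x).isSome)) = true → (l.mapM f).isSome = true := by
  intro l
  induction l with
  | nil => intro _; rfl
  | cons x xs ih =>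
    intro h
    simp only [List.all_cons, Bool.and_eq_true] at h
    obtain ⟨fx, hfx⟩ := Option.isSome_iff_exists.mp h.1
    obtain ⟨r, hr⟩ := Option.isSome_iff_exists.mp (ih h.2)
    simp [List.mapM_cons, hfx, hr]

-- ===== VERDICT (by name: the statement is the Claim_ definition above) =====
theorem is_latest_spec : Claim_equal_is_latest := by
  intro nv vs _dom hpre
  unfold Spec_is_latest is_latest is_latest_alt
  cases hp : parseSemver? nv with
  | none =>
    exfalso
    have h2 := mapM_isSome_of_all PySem.Int.ofStr? ((PySem.Str.split? nv ".").getD []) hpre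
    unfold parseSemver? at hp
    rw [hp] at h2
    simp at h2
  | some np =>
    dsimp only
    rw [loopA_eq_any]
    cases hps : vs.filterMap parseSemver? with
    | nil => simp
    | cons h t =>
      simp only [lexGe_eq_not_lexGt, foldl_max_gt, List.any_cons]
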